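-- pv_equiv track=rewrite | github.com/beeminder/road | museum/blib.py | odomify0
-- ===== SOURCE A (Python) =====
-- def odomify0(l):
--   if not l: return l
--   curadd = 0
--   prev = l[0]
--   out = [prev]
--   for i in l[1:]:
--     if i == 0: curadd += prev
--     prev = i
--     out.append(i + curadd)
--   return out
-- ===== SOURCE B (Python) =====
-- def odomify0(l):
--   if not l: return l
--   # delta table: the offset gained at each position (previous value when a reset-to-0 occurs)
--   deltas = [p if c == 0 else 0 for p, c in zip(l, l[1:])]
--   offsets = []
--   s = 0
--   for d in deltas:
--     s += d
--     offsets.append(s)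
--   return [l[0]] + [v + o for v, o in zip(l[1:], offsets)]
-- ===== Notes on version B (the rewrite author's own statement) =====
-- stated objective: alternative
-- what changed: B replaces A's single stateful loop (curadd/prev carried inline) by a three-phase decomposition: build a delta table from zip(l, l[1:]), prefix-sum it into an offsets table, then map l[1:] plus offsets; the head stays raw.
import Mathlib
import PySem

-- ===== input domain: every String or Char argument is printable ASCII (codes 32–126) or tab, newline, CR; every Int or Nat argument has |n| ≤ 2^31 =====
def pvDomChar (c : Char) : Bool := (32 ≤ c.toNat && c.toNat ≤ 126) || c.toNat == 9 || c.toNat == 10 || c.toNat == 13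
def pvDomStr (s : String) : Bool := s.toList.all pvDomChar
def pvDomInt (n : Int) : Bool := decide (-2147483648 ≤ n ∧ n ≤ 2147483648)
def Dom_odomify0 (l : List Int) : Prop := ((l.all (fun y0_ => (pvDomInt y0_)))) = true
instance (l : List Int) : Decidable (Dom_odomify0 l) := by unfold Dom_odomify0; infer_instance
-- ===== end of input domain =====

-- B rebuilds A's odometer adjustment as delta table + prefix sums + map (alternative decomposition, same cost).

-- ===== PORT A =====
-- loop body of A: state = (curadd, prev, out)
def odomify0Step (s : Int × Int × List Int) (i : Int) : Int × Int × List Int :=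
  let c := if i = 0 then s.1 + s.2.1 else s.1
  (c, i, s.2.2 ++ [i + c])

def odomify0 (l : List Int) : List Int :=
  match l with
  | [] => l
  | prev :: rest => (rest.foldl odomify0Step (0, prev, [prev])).2.2

-- ===== PORT B =====
-- Source B's running-sum loop over the delta table (s += d; offsets.append(s))
def odomify0Acc (s : Int) (ds : List Int) : List Int :=
  match ds with
  | [] => []
  | d :: ds' => (s + d) :: odomify0Acc (s + d) ds'

def odomify0_alt (l : List Int) : List Int :=
  match l with
  | [] => l
  | h :: t =>
    let deltas := ((h :: t).zip t).map (fun p => if p.2 = 0 then p.1 else 0)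
    let offsets := odomify0Acc 0 deltas
    h :: List.zipWith (· + ·) t offsets

-- ===== PRECONDITION & SPEC =====
def Spec_odomify0 (l : List Int) (out : List Int) : Prop := out = odomify0_alt l
instance (l : List Int) (out : List Int) : Decidable (Spec_odomify0 l out) := by unfold Spec_odomify0; infer_instance

-- ===== CLAIM (what is proved, stated in full; the proofs are below) =====
def Claim_equal_odomify0 : Prop := ∀ (l : List Int), Dom_odomify0 l → Spec_odomify0 l (odomify0 l)

-- ===== LEMMAS AND PROOFS =====

lemma odomify0_fold (t : List Int) (c prev : Int) (out : List Int) :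
    (t.foldl odomify0Step (c, prev, out)).2.2
      = out ++ List.zipWith (· + ·) t
          (odomify0Acc c (((prev :: t).zip t).map (fun p => if p.2 = 0 then p.1 else 0))) := by
  induction t generalizing c prev out with
  | nil => simp [odomify0Acc]
  | cons i t' ih =>
      simp only [List.foldl_cons, odomify0Step, List.zip_cons_cons, List.map_cons, odomify0Acc]
      rw [ih]
      have hc : (if i = 0 then c + prev else c) = c + (if i = 0 then prev else 0) := by
        split <;> simp
      simp [hc, List.append_assoc]

-- ===== VERDICT (by name: the statement is the Claim_ definition above) =====
theorem odomify0_spec : Claim_equal_odomify0 := by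
  intro l _
  unfold Spec_odomify0
  cases l with
  | nil => rfl
  | cons h t =>
      simp only [odomify0, odomify0_alt, odomify0_fold]
      rfl
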